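-- pv_equiv track=rewrite | github.com/CMABERY/4GARTHA | canon/ids.py | is_sha256_prefixed
-- ===== SOURCE A (Python) =====
-- def is_sha256_prefixed(s: str, prefix: str = "sha256") -> bool:
--     if not isinstance(s, str):
--         return False
--     if not s.startswith(prefix + ":"):
--         return False
--     hexpart = s.split(":", 1)[1]
--     if len(hexpart) != 64:
--         return False
--     return all(c in "0123456789abcdef" for c in hexpart)
-- ===== SOURCE B (Python) =====
-- def is_sha256_prefixed(s: str, prefix: str = "sha256") -> bool:
--     if not isinstance(s, str):
--         return False
--     n = len(prefix)
--     if len(s) != n + 65: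
--         return False
--     for i, c in enumerate(s):
--         if i < n:
--             if c != prefix[i]:
--                 return False
--         elif i == n:
--             if c != ":":
--                 return False
--         elif not ("0" <= c <= "9" or "a" <= c <= "f"):
--             return False
--     return True
-- ===== Notes on version B (the rewrite author's own statement) =====
-- stated objective: alternative
-- what changed: Replaces A's staged string pipeline (startswith, split at the first colon, length test, membership scan of the tail) by a single indexed pass: one length equation up front, then one loop over enumerate(s) that checks each position against its zone (prefix char / separator colon / hex digit by range comparison).
-- intended difference: When the prefix itself contains a colon and s is exactly the prefix, then a colon, then 64 hex digits, A returns False because it splits s at its first colon, which falls inside the prefix, while B returns True, the intended acceptance of a well-formed id for that prefix. — e.g. on is_sha256_prefixed("a:b:0123456789abcdef0123456789abcdef0123456789abcdef0123456789abcdef", "a:b"): A returns false, B returns true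
import Mathlib
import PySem

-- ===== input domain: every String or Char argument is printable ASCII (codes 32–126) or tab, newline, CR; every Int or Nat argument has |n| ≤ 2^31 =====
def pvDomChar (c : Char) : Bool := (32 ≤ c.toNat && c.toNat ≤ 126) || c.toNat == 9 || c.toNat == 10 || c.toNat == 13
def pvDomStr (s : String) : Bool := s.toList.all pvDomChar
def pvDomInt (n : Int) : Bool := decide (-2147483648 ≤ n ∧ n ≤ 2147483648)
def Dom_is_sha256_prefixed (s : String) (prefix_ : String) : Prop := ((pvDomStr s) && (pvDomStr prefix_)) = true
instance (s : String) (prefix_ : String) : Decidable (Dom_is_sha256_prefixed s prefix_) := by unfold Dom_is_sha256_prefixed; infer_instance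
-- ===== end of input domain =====

-- B replaces A's staged pipeline (startswith / split at the first colon / length test / membership
-- scan of the tail) by one length equation plus a single indexed pass over enumerate(s) that checks
-- each position against its zone (prefix char, colon, hex digit by range comparison); no speed claim.

-- ===== PORT A =====
def is_sha256_prefixed (s : String) (prefix_ : String) : Bool :=
  if !(PySem.Str.startswith s (prefix_ ++ ":")) then false
  else
    match PySem.Str.splitMax? s ":" 1 with
    | none => false  -- unreachable: the separator is nonempty
    | some parts =>
      match PySem.List.pyGet? parts 1 with
      | none => false  -- unreachable: the startswith guard guarantees a separator in s, so the split has two parts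
      | some hexpart =>
        if PySem.Str.len hexpart != 64 then false
        else hexpart.toList.all (fun c => PySem.Chars.isIn [c] "0123456789abcdef".toList)

-- ===== PORT B =====
-- single pass: total length must be len(prefix)+65, and each enumerated position is checked
-- against its zone; 'c != prefix[i]' is ported as pyGet? prefix i == some c (i < n, so in range).
def is_sha256_prefixed_alt (s : String) (prefix_ : String) : Bool :=
  let p := prefix_.toList
  let n := p.length
  if s.toList.length ≠ n + 65 then false
  else (PySem.List.enumerate s.toList 0).all (fun ic =>
    if ic.1 < (n : Int) then PySem.List.pyGet? p ic.1 == some ic.2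
    else if ic.1 = (n : Int) then ic.2 == ':'
    else (('0' ≤ ic.2 && ic.2 ≤ '9') || ('a' ≤ ic.2 && ic.2 ≤ 'f')))

-- ===== PRECONDITION & SPEC =====
-- When the prefix itself contains a colon and s is exactly the prefix, then a colon, then 64 hex
-- digits, A returns False (it splits s at its FIRST colon, which falls inside the prefix, so its hex
-- part is never 64 hex digits) while B returns True — the intended acceptance of a well-formed id.
def D_is_sha256_prefixed (s : String) (prefix_ : String) : Prop :=
  ':' ∈ prefix_.toList ∧
  s.toList.length = prefix_.toList.length + 65 ∧
  s.toList.take (prefix_.toList.length + 1) = prefix_.toList ++ [':'] ∧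
  (s.toList.drop (prefix_.toList.length + 1)).all (fun c => c ∈ "0123456789abcdef".toList) = true
instance (s : String) (prefix_ : String) : Decidable (D_is_sha256_prefixed s prefix_) := by unfold D_is_sha256_prefixed; infer_instance

def Spec_is_sha256_prefixed (s : String) (prefix_ : String) (out : Bool) : Prop := ¬ D_is_sha256_prefixed s prefix_ → out = is_sha256_prefixed_alt s prefix_
instance (s : String) (prefix_ : String) (out : Bool) : Decidable (Spec_is_sha256_prefixed s prefix_ out) := by unfold Spec_is_sha256_prefixed; infer_instance

def pvDiffWitness_is_sha256_prefixed : String × String :=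
  ("a:b:0123456789abcdef0123456789abcdef0123456789abcdef0123456789abcdef", "a:b")
def pvDiffWitnessOut_is_sha256_prefixed : Bool × Bool := (false, true)

-- ===== CLAIM (what is proved, stated in full; the proofs are below) =====
def Claim_unchanged_is_sha256_prefixed : Prop := ∀ (s : String) (prefix_ : String), Dom_is_sha256_prefixed s prefix_ → Spec_is_sha256_prefixed s prefix_ (is_sha256_prefixed s prefix_)
def Claim_changed_is_sha256_prefixed : Prop := Dom_is_sha256_prefixed (pvDiffWitness_is_sha256_prefixed.1) (pvDiffWitness_is_sha256_prefixed.2) ∧ D_is_sha256_prefixed (pvDiffWitness_is_sha256_prefixed.1) (pvDiffWitness_is_sha256_prefixed.2) ∧ is_sha256_prefixed (pvDiffWitness_is_sha256_prefixed.1) (pvDiffWitness_is_sha256_prefixed.2) = pvDiffWitnessOut_is_sha256_prefixed.1 ∧ is_sha256_prefixed_alt (pvDiffWitness_is_sha256_prefixed.1) (pvDiffWitness_is_sha256_prefixed.2) = pvDiffWitnessOut_is_sha256_prefixed.2 ∧ pvDiffWitnessOut_is_sha256_prefixed.1 ≠ pvDiffWitnessOut_is_sha256_prefixed.2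
def Claim_exact_is_sha256_prefixed : Prop := ∀ (s : String) (prefix_ : String), Dom_is_sha256_prefixed s prefix_ → D_is_sha256_prefixed s prefix_ → is_sha256_prefixed s prefix_ ≠ is_sha256_prefixed_alt s prefix_

-- ===== LEMMAS AND PROOFS =====

-- a hex digit by range comparison is exactly a character of "0123456789abcdef"
lemma hexchar (c : Char) : (('0' ≤ c && c ≤ '9') || ('a' ≤ c && c ≤ 'f')) = ("0123456789abcdef".toList.contains c) := by
  have hxp : ∀ d : Char, (c = d) ↔ (c.toNat = d.toNat) :=
    fun d => ⟨fun h => by rw [h], fun h => Char.ext (UInt32.toNat_inj.mp h)⟩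
  have hle : ∀ a b : Char, (decide (a ≤ b)) = (decide (a.toNat ≤ b.toNat)) := by
    intro a b
    rw [decide_eq_decide, Char.le_def, UInt32.le_iff_toNat_le]
    exact Iff.rfl
  simp only [List.contains, List.elem_eq_mem,
    show "0123456789abcdef".toList = ['0','1','2','3','4','5','6','7','8','9','a','b','c','d','e','f'] from rfl,
    List.mem_cons, List.not_mem_nil, or_false, hxp, hle]
  rw [Bool.eq_iff_iff]
  simp only [Bool.or_eq_true, Bool.and_eq_true, decide_eq_true_eq,
    show ('0').toNat = 48 from rfl, show ('1').toNat = 49 from rfl, show ('2').toNat = 50 from rfl,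
    show ('3').toNat = 51 from rfl, show ('4').toNat = 52 from rfl, show ('5').toNat = 53 from rfl,
    show ('6').toNat = 54 from rfl, show ('7').toNat = 55 from rfl, show ('8').toNat = 56 from rfl,
    show ('9').toNat = 57 from rfl, show ('a').toNat = 97 from rfl, show ('b').toNat = 98 from rfl,
    show ('c').toNat = 99 from rfl, show ('d').toNat = 100 from rfl, show ('e').toNat = 101 from rfl,
    show ('f').toNat = 102 from rfl]
  omega

-- splitOnMax.go once maxsplit is exhausted
lemma go_zero (sep : List Char) (fuel : Nat) (l cur : List Char) (acc : List (List Char)) :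
    PySem.Chars.splitOnMax.go sep fuel 0 l cur acc = ((cur.reverse ++ l) :: acc).reverse := by
  cases fuel with
  | zero => simp [PySem.Chars.splitOnMax.go]
  | succ f => cases l <;> simp [PySem.Chars.splitOnMax.go]

lemma go_one_step (f : Nat) (c : Char) (rest cur : List Char) (acc : List (List Char)) :
    PySem.Chars.splitOnMax.go [':'] (f + 1) 1 (c :: rest) cur acc =
      if c = ':' then PySem.Chars.splitOnMax.go [':'] f 0 rest [] (cur.reverse :: acc)
      else PySem.Chars.splitOnMax.go [':'] f 1 rest (c :: cur) acc := by
  have hcc : (¬ (':' = c)) ↔ (¬ (c = ':')) := ⟨fun h h2 => h h2.symm, fun h h2 => h h2.symm⟩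
  by_cases hc : c = ':'
  · subst hc; simp [PySem.Chars.splitOnMax.go, List.isPrefixOf]
  · simp [PySem.Chars.splitOnMax.go, List.isPrefixOf, beq_iff_eq, hcc.mpr hc, hc]

-- splitOnMax.go with maxsplit 1 and separator ":" splits at the first colon
lemma go_one (l : List Char) : ∀ (fuel : Nat), l.length ≤ fuel → ∀ (cur : List Char) (acc : List (List Char)),
    PySem.Chars.splitOnMax.go [':'] fuel 1 l cur acc =
      if ':' ∈ l then
        acc.reverse ++ [cur.reverse ++ l.takeWhile (· ≠ ':'), l.drop ((l.takeWhile (· ≠ ':')).length + 1)]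
      else ((cur.reverse ++ l) :: acc).reverse := by
  induction l with
  | nil =>
    intro fuel _ cur acc
    cases fuel <;> simp [PySem.Chars.splitOnMax.go]
  | cons c rest ih =>
    intro fuel hf cur acc
    cases fuel with
    | zero => simp at hf
    | succ f =>
      have hrest : rest.length ≤ f := by simpa using hf
      rw [go_one_step]
      by_cases hc : c = ':'
      · subst hc
        rw [if_pos rfl, go_zero]
        simp
      · rw [if_neg hc, ih f hrest]
        have hcc : ¬ (':' = c) := fun h => hc h.symm
        by_cases hm : ':' ∈ rest <;> simp [hm, hc, hcc]

lemma isIn_singleton (c : Char) (l : List Char) :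
    PySem.Chars.isIn [c] l = l.contains c := by
  by_cases h : c ∈ l
  · rw [(PySem.Chars.isIn_iff_infix [c] l).mpr ((List.singleton_infix_iff c l).mpr h)]
    simp [h]
  · rw [(PySem.Chars.isIn_eq_false_iff [c] l).mpr (fun hin => h ((List.singleton_infix_iff c l).mp hin))]
    simp [h]

-- characterisation of A's result when the prefix contains no colon
lemma a_true_iff (s prefix_ : String) (hpre : ':' ∉ prefix_.toList) :
    is_sha256_prefixed s prefix_ = true ↔
      ∃ v : List Char, s.toList = prefix_.toList ++ ':' :: v ∧ v.length = 64 ∧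
        ∀ c ∈ v, ("0123456789abcdef".toList.contains c) = true := by
  unfold is_sha256_prefixed
  set t := s.toList with ht
  set p := prefix_.toList with hp
  have hswc : PySem.Str.startswith s (prefix_ ++ ":") = PySem.Chars.startswith t (p ++ [':']) := by
    simp [PySem.Str.startswith, String.toList_append, ht, hp, show (":" : String).toList = [':'] from rfl]
  cases hsw : PySem.Chars.startswith t (p ++ [':']) with
  | false =>
    rw [hswc, hsw]
    simp only [Bool.not_false, if_true]
    constructor
    · intro h; cases h
    · rintro ⟨v, hv, -, -⟩
      exfalso
      have : PySem.Chars.startswith t (p ++ [':']) = true :=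
        (PySem.Chars.startswith_iff _ _).mpr ⟨v, by rw [hv]; simp⟩
      rw [hsw] at this; cases this
  | true =>
    obtain ⟨w, hw⟩ := (PySem.Chars.startswith_iff _ _).mp hsw
    have hw' : t = p ++ ':' :: w := by rw [← hw]; simp
    have hmem : ':' ∈ t := by rw [hw']; simp
    have htw : t.takeWhile (fun c => decide (c ≠ ':')) = p := by
      rw [hw', List.takeWhile_append]
      have hself : p.takeWhile (fun c => decide (c ≠ ':')) = p :=
        List.takeWhile_eq_self_iff.mpr (fun x hx => by
          simp only [ne_eq, decide_eq_true_eq]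
          exact fun h => hpre (h ▸ hx))
      rw [if_pos (by rw [hself])]
      simp
    have hdrop : t.drop (p.length + 1) = w := by
      rw [hw', show p ++ ':' :: w = (p ++ [':']) ++ w from by simp,
        show p.length + 1 = (p ++ [':']).length from by simp, List.drop_left]
    have hparts : PySem.Str.splitMax? s ":" 1 = some [String.ofList p, String.ofList w] := by
      show Option.map (List.map String.ofList) (PySem.Chars.splitMax? t [':'] 1) = _
      rw [show PySem.Chars.splitMax? t [':'] 1 = some (PySem.Chars.splitOnMax t [':'] 1) from by
        simp [PySem.Chars.splitMax?]]
      rw [show PySem.Chars.splitOnMax t [':'] 1 = PySem.Chars.splitOnMax.go [':'] (t.length + 1) 1 t [] [] from by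
        simp [PySem.Chars.splitOnMax]]
      rw [go_one t (t.length + 1) (by omega) [] []]
      rw [if_pos hmem]
      simp only [List.reverse_nil, List.nil_append, htw, hdrop]
      rfl
    have hget : PySem.List.pyGet? [String.ofList p, String.ofList w] (1 : Int) = some (String.ofList w) := by
      simp [PySem.List.pyGet?, PySem.List.pyIdx?]
    rw [hswc, hsw, hparts]
    simp only [Bool.not_true, Bool.false_eq_true, if_false, hget]
    by_cases hlen : w.length = 64
    · rw [if_neg (by simp [PySem.Str.len_eq, hlen])]
      constructor
      · intro h
        refine ⟨w, hw', hlen, ?_⟩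
        intro c hc
        have := (List.all_eq_true.mp (by simpa using h)) c (by simpa using hc)
        rwa [isIn_singleton] at this
      · rintro ⟨v, hv, hvlen, hhex⟩
        have hvw : v = w := by have h2 := hv.symm.trans hw'; simpa using h2
        subst hvw
        apply List.all_eq_true.mpr
        intro c hc
        rw [isIn_singleton]
        exact hhex c (by simpa using hc)
    · rw [if_pos (by simp only [PySem.Str.len_eq, String.toList_ofList, bne_iff_ne, ne_eq]; exact_mod_cast hlen)]
      constructor
      · intro h; cases h
      · rintro ⟨v, hv, hvlen, hhex⟩
        exfalso
        have hvw : v = w := by have h2 := hv.symm.trans hw'; simpa using h2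
        exact hlen (hvw ▸ hvlen)

-- when the prefix contains a colon, A always rejects: the split at s's first colon happens inside
-- the prefix, so A's "hex part" still contains the separator colon and the membership scan fails
lemma a_false_of_colon (s prefix_ : String) (hc : ':' ∈ prefix_.toList) :
    is_sha256_prefixed s prefix_ = false := by
  unfold is_sha256_prefixed
  set t := s.toList with ht
  set p := prefix_.toList with hp
  have hswc : PySem.Str.startswith s (prefix_ ++ ":") = PySem.Chars.startswith t (p ++ [':']) := by
    simp [PySem.Str.startswith, String.toList_append, ht, hp, show (":" : String).toList = [':'] from rfl]
  cases hsw : PySem.Chars.startswith t (p ++ [':']) with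
  | false => rw [hswc, hsw]; rfl
  | true =>
    obtain ⟨w, hw⟩ := (PySem.Chars.startswith_iff _ _).mp hsw
    have hw' : t = p ++ ':' :: w := by rw [← hw]; simp
    have hmem : ':' ∈ t := by rw [hw']; simp
    set u := t.takeWhile (fun c => decide (c ≠ ':')) with hu
    have hptw : p.takeWhile (fun c => decide (c ≠ ':')) ≠ p := by
      intro hself
      have := List.takeWhile_eq_self_iff.mp hself ':' hc
      simp at this
    have hup : u = p.takeWhile (fun c => decide (c ≠ ':')) := by
      rw [hu, hw', List.takeWhile_append]
      rw [if_neg (fun hlen => hptw ((List.takeWhile_prefix _).eq_of_length hlen))]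
    have hul : u.length < p.length := by
      rw [hup]
      rcases lt_or_eq_of_le (List.takeWhile_prefix (fun c => decide (c ≠ ':')) (l := p)).length_le with h | h
      · exact h
      · exact absurd ((List.takeWhile_prefix _).eq_of_length h) hptw
    have hcolon : ':' ∈ t.drop (u.length + 1) := by
      rw [hw', show p ++ ':' :: w = (p ++ [':']) ++ w from by simp]
      rw [List.mem_iff_getElem]
      refine ⟨p.length - (u.length + 1), by simp; omega, ?_⟩
      rw [List.getElem_drop]
      have hidx : u.length + 1 + (p.length - (u.length + 1)) = p.length := by omega
      simp only [hidx]
      rw [List.getElem_append_left (by simp)]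
      simp [List.getElem_append_right]
    have hparts : PySem.Str.splitMax? s ":" 1 =
        some [String.ofList u, String.ofList (t.drop (u.length + 1))] := by
      show Option.map (List.map String.ofList) (PySem.Chars.splitMax? t [':'] 1) = _
      rw [show PySem.Chars.splitMax? t [':'] 1 = some (PySem.Chars.splitOnMax t [':'] 1) from by
        simp [PySem.Chars.splitMax?]]
      rw [show PySem.Chars.splitOnMax t [':'] 1 = PySem.Chars.splitOnMax.go [':'] (t.length + 1) 1 t [] [] from by
        simp [PySem.Chars.splitOnMax]]
      rw [go_one t (t.length + 1) (by omega) [] []]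
      rw [if_pos hmem]
      rfl
    have hget : PySem.List.pyGet? [String.ofList u, String.ofList (t.drop (u.length + 1))] (1 : Int)
        = some (String.ofList (t.drop (u.length + 1))) := by
      simp [PySem.List.pyGet?, PySem.List.pyIdx?]
    rw [hswc, hsw, hparts]
    simp only [Bool.not_true, Bool.false_eq_true, if_false, hget]
    by_cases hlen : (t.drop (u.length + 1)).length = 64
    · rw [if_neg (by simp [PySem.Str.len_eq, hlen])]
      rw [Bool.eq_false_iff]
      intro hall
      have := (List.all_eq_true.mp (by simpa using hall)) ':' (by simpa using hcolon)
      rw [isIn_singleton] at this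
      simp at this
    · rw [if_pos (by simp only [PySem.Str.len_eq, String.toList_ofList, bne_iff_ne, ne_eq]; exact_mod_cast hlen)]

-- the zone check over the enumerated hex segment reduces to the range test on each character
lemma all_enum_zone (p : List Char) (v : List Char) (m : Int) (hm : (p.length : Int) < m) :
    ((PySem.List.enumerate v m).all (fun ic =>
        if ic.1 < (p.length : Int) then PySem.List.pyGet? p ic.1 == some ic.2
        else if ic.1 = (p.length : Int) then ic.2 == ':'
        else (('0' ≤ ic.2 && ic.2 ≤ '9') || ('a' ≤ ic.2 && ic.2 ≤ 'f')))) =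
      v.all (fun c => (('0' ≤ c && c ≤ '9') || ('a' ≤ c && c ≤ 'f'))) := by
  induction v generalizing m with
  | nil => simp [PySem.List.enumerate_nil]
  | cons c rest ih =>
    rw [PySem.List.enumerate_cons, List.all_cons, List.all_cons, ih (m + 1) (by omega)]
    have h1 : ¬ (m < (p.length : Int)) := by omega
    have h2 : ¬ (m = (p.length : Int)) := by omega
    simp [h1, h2]

-- characterisation of B's result
lemma alt_true_iff (s prefix_ : String) :
    is_sha256_prefixed_alt s prefix_ = true ↔
      ∃ v : List Char, s.toList = prefix_.toList ++ ':' :: v ∧ v.length = 64 ∧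
        ∀ c ∈ v, (('0' ≤ c && c ≤ '9') || ('a' ≤ c && c ≤ 'f')) = true := by
  unfold is_sha256_prefixed_alt
  set t := s.toList with ht
  set p := prefix_.toList with hp
  set n := p.length with hn
  simp only []
  constructor
  · intro h
    by_cases hl : t.length ≠ n + 65
    · rw [if_pos hl] at h; cases h
    · rw [if_neg hl] at h
      have hlen : t.length = n + 65 := by omega
      have hall := List.all_eq_true.mp h
      have hchk : ∀ (k : Nat) (hk : k < t.length),
          (if ((0 : Int) + k) < (n : Int) then PySem.List.pyGet? p ((0 : Int) + k) == some t[k]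
           else if ((0 : Int) + k) = (n : Int) then t[k] == ':'
           else (('0' ≤ t[k] && t[k] ≤ '9') || ('a' ≤ t[k] && t[k] ≤ 'f'))) = true := by
        intro k hk
        exact hall ((0 : Int) + k, t[k]) ((PySem.List.mem_enumerate_iff _ _ _).mpr ⟨k, hk, rfl⟩)
      -- the first n characters are the prefix
      have htake : t.take n = p := by
        apply List.ext_getElem
        · simp only [List.length_take]; omega
        · intro k h1 h2
          have hk : k < t.length := by omega
          have hkn : k < n := by simpa [hlen] using h2
          have := hchk k hk
          rw [if_pos (by omega)] at this
          have hg : PySem.List.pyGet? p ((0 : Int) + k) = p[k]? := by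
            rw [show ((0 : Int) + k) = (k : Int) by omega]
            exact PySem.List.pyGet?_natCast p k
          rw [hg, List.getElem?_eq_getElem hkn] at this
          have := (beq_iff_eq.mp this)
          simp only [Option.some.injEq] at this
          simp [List.getElem_take, this]
      -- character n is the colon
      have hcolon : t[n]'(by omega) = ':' := by
        have := hchk n (by omega)
        rw [if_neg (by omega), if_pos (by omega)] at this
        exact beq_iff_eq.mp this
      refine ⟨t.drop (n + 1), ?_, by simp [hlen], ?_⟩
      · conv_lhs => rw [← List.take_append_drop n t]
        rw [htake, List.drop_eq_getElem_cons (by omega), hcolon]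
      · intro c hc
        obtain ⟨k, hk, hck⟩ := List.mem_iff_getElem.mp hc
        have hkt : n + 1 + k < t.length := by
          have := hk; simp [hlen] at this; omega
        have hgd : (t.drop (n + 1))[k] = t[n + 1 + k]'hkt := by
          simp [List.getElem_drop]
        have := hchk (n + 1 + k) hkt
        rw [if_neg (by omega), if_neg (by omega)] at this
        rw [← hck, hgd]
        exact this
  · rintro ⟨v, hv, hvlen, hhex⟩
    have hl : ¬ (t.length ≠ n + 65) := by
      rw [hv]; simp [hvlen]; omega
    rw [if_neg hl]
    rw [hv, PySem.List.enumerate_append, List.all_append, PySem.List.enumerate_cons]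
    refine Bool.and_intro ?_ ?_
    · -- the prefix zone
      apply List.all_eq_true.mpr
      intro ic hic
      obtain ⟨k, hk, hik⟩ := (PySem.List.mem_enumerate_iff _ _ _).mp hic
      subst hik
      simp only
      rw [if_pos (by omega)]
      have hg : PySem.List.pyGet? p ((0 : Int) + k) = p[k]? := by
        rw [show ((0 : Int) + k) = (k : Int) by omega]
        exact PySem.List.pyGet?_natCast p k
      rw [hg, List.getElem?_eq_getElem hk]
      exact beq_iff_eq.mpr rfl
    · rw [List.all_cons]
      refine Bool.and_intro ?_ ?_
      · simp only []
        rw [if_neg (by omega), if_pos (by omega)]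
        exact beq_iff_eq.mpr rfl
      · rw [show ((0 : Int) + (p.length : Int) + 1) = ((p.length : Int) + 1) by omega]
        rw [all_enum_zone p v ((p.length : Int) + 1) (by omega)]
        exact List.all_eq_true.mpr (fun c hc => hhex c hc)

theorem ab_eq (s prefix_ : String) (hpre : ':' ∉ prefix_.toList) :
    is_sha256_prefixed s prefix_ = is_sha256_prefixed_alt s prefix_ := by
  rw [Bool.eq_iff_iff, a_true_iff s prefix_ hpre, alt_true_iff s prefix_]
  constructor
  · rintro ⟨v, h1, h2, h3⟩
    exact ⟨v, h1, h2, fun c hc => by rw [hexchar]; exact h3 c hc⟩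
  · rintro ⟨v, h1, h2, h3⟩
    exact ⟨v, h1, h2, fun c hc => by rw [← hexchar]; exact h3 c hc⟩

-- ===== VERDICT (by name: the statements are the Claim_ definitions above) =====
theorem is_sha256_prefixed_spec : Claim_unchanged_is_sha256_prefixed := by
  intro s prefix_ _ hnd
  by_cases hc : ':' ∈ prefix_.toList
  · rw [a_false_of_colon s prefix_ hc]
    cases hb : is_sha256_prefixed_alt s prefix_ with
    | false => rfl
    | true =>
      exfalso
      obtain ⟨v, hv, hvlen, hhex⟩ := (alt_true_iff s prefix_).mp hb
      exact hnd ⟨hc, by rw [hv]; simp [hvlen],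
        by rw [hv, show prefix_.toList ++ ':' :: v = (prefix_.toList ++ [':']) ++ v from by simp,
          List.take_left' (by simp)],
        by
          rw [hv, show prefix_.toList ++ ':' :: v = (prefix_.toList ++ [':']) ++ v from by simp,
            show prefix_.toList.length + 1 = (prefix_.toList ++ [':']).length from by simp,
            List.drop_left]
          apply List.all_eq_true.mpr
          intro c hcv
          have := hhex c hcv
          rw [hexchar] at this
          simpa using this⟩
  · exact ab_eq s prefix_ hc

set_option maxRecDepth 2048 in
theorem is_sha256_prefixed_changed : Claim_changed_is_sha256_prefixed := by
  unfold Claim_changed_is_sha256_prefixed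
  exact ⟨by decide, by decide, a_false_of_colon _ _ (by decide), by decide, by decide⟩

theorem is_sha256_prefixed_tight : Claim_exact_is_sha256_prefixed := by
  intro s prefix_ _ hD
  obtain ⟨hc, hlen, htake, hhex⟩ := hD
  rw [a_false_of_colon s prefix_ hc]
  have hb : is_sha256_prefixed_alt s prefix_ = true := by
    apply (alt_true_iff s prefix_).mpr
    refine ⟨s.toList.drop (prefix_.toList.length + 1), ?_, by simp [hlen], ?_⟩
    · conv_lhs => rw [← List.take_append_drop (prefix_.toList.length + 1) s.toList]
      rw [htake]
      simp
    · intro c hcv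
      have hx := List.all_eq_true.mp hhex c hcv
      rw [hexchar]
      simpa using hx
  rw [hb]
  exact Bool.false_ne_true
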